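-- pv_equiv track=rewrite | github.com/thehalleyyoung/diversity-decoding | src/algorithms/stochastic_beam.py | _check_ngram_repetition
-- ===== SOURCE A (Python) =====
-- from typing import (
--     Any,
--     Callable,
--     Dict,
--     FrozenSet,
--     List,
--     Optional,
--     Sequence as SequenceType,
--     Set,
--     Tuple,
--     Union,
-- )
--
-- def _check_ngram_repetition(tokens: List[int], n: int) -> bool:
--     """Check if the last n-gram in tokens is a repetition.
--
--     Parameters
--     ----------
--     tokens : list of int
--         Token sequence to check.
--     n : int
--         N-gram size.
--
--     Returns
--     -------
--     bool
--         True if the last n-gram has appeared earlier in the sequence.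
--     """
--     if len(tokens) < n:
--         return False
--
--     last_ngram = tuple(tokens[-n:])
--     for i in range(len(tokens) - n):
--         if tuple(tokens[i : i + n]) == last_ngram:
--             return True
--     return False
-- ===== SOURCE B (Python) =====
-- def _check_ngram_repetition(tokens, n):
--     """Rabin-Karp: rolling hash over the n-gram windows, exact list comparison
--     only on a hash hit, so the scan is O(L + n) instead of O(L*n)."""
--     if n < 1 or len(tokens) < n:
--         return False
--     L = len(tokens)
--     BASE = 1000003
--     MOD = (1 << 61) - 1
--     pat = tokens[L - n:]
--     target = 0
--     for t in pat:
--         target = (target * BASE + t) % MOD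
--     h = 0
--     for t in tokens[:n]:
--         h = (h * BASE + t) % MOD
--     p = 1
--     for _ in range(n - 1):
--         p = p * BASE % MOD
--     for i in range(L - n):
--         if h == target and tokens[i:i + n] == pat:
--             return True
--         h = ((h - tokens[i] * p) * BASE + tokens[i + n]) % MOD
--     return False
-- ===== Notes on version B (the rewrite author's own statement) =====
-- stated objective: faster
-- what changed: Replaces A's rebuild-and-compare of an n-length tuple at every earlier position with a Rabin-Karp rolling hash over the n-gram windows, doing the exact window comparison only on a hash hit.
-- outside the precondition, e.g. on _check_ngram_repetition([1, 1], -1): A returns True, B returns False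
import Mathlib
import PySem

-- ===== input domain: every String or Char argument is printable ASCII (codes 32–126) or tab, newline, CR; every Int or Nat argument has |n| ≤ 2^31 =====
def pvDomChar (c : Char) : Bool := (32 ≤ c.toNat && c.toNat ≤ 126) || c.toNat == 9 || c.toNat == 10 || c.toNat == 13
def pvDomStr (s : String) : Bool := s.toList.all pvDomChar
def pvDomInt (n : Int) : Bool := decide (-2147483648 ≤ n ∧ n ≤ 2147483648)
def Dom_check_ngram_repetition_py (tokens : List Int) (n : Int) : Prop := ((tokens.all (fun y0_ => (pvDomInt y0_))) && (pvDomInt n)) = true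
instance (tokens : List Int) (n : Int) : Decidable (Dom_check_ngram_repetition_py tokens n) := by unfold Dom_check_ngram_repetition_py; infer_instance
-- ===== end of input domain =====

-- B replaces A's rebuild-a-window-per-position scan by a Rabin-Karp rolling hash
-- (exact window comparison only on a hash hit); equivalence is proved for n ≥ 0.

-- ===== PORT A =====
def check_ngram_repetition_py (tokens : List Int) (n : Int) : Bool :=
  if (tokens.length : Int) < n then false
  else
    let last := PySem.List.slice tokens (some (-n)) none
    (PySem.List.pyRange 0 ((tokens.length : Int) - n) 1).foldl
      (fun acc i =>
        acc || (PySem.List.slice tokens (some i) (some (i + n)) == last)) false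

-- ===== PORT B =====
-- constants of Source B
def pvB : Int := 1000003
def pvM : Int := 2305843009213693951   -- (1 << 61) - 1

def check_ngram_repetition_py_alt (tokens : List Int) (n : Int) : Bool :=
  if n < 1 || (tokens.length : Int) < n then false
  else
    let L : Int := tokens.length
    let pat := PySem.List.slice tokens (some (L - n)) none
    let target := pat.foldl (fun a t => PySem.Int.mod (a * pvB + t) pvM) 0
    let h0 := (PySem.List.slice tokens none (some n)).foldl
      (fun a t => PySem.Int.mod (a * pvB + t) pvM) 0
    let p := (PySem.List.pyRange 0 (n - 1) 1).foldl
      (fun a _ => PySem.Int.mod (a * pvB) pvM) 1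
    let res := (PySem.List.pyRange 0 (L - n) 1).foldl
      (fun st i =>
        if st.1 then st
        else if st.2 == target
                && (PySem.List.slice tokens (some i) (some (i + n)) == pat)
        then (true, st.2)
        else (false,
          PySem.Int.mod
            ((st.2 - PySem.List.pyGetD tokens i 0 * p) * pvB
              + PySem.List.pyGetD tokens (i + n) 0) pvM))
      (false, h0)
    res.1

-- ===== PRECONDITION & SPEC =====
-- Pre_ excludes n < 0 (a malformed n-gram size, outside the task's natural domain):
-- there A's negative slice bounds wrap around and its value is an accident of
-- Python slicing, while B reports no repetition.
def Pre_check_ngram_repetition_py (tokens : List Int) (n : Int) : Prop := 0 ≤ n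
instance (tokens : List Int) (n : Int) : Decidable (Pre_check_ngram_repetition_py tokens n) := by unfold Pre_check_ngram_repetition_py; infer_instance
def pvWitness_check_ngram_repetition_py : List Int × Int := ([1, 2, 1, 2, 3], 2)

def Spec_check_ngram_repetition_py (tokens : List Int) (n : Int) (out : Bool) : Prop := out = check_ngram_repetition_py_alt tokens n
instance (tokens : List Int) (n : Int) (out : Bool) : Decidable (Spec_check_ngram_repetition_py tokens n out) := by unfold Spec_check_ngram_repetition_py; infer_instance

-- ===== CLAIM (what is proved, stated in full; the proofs are below) =====
def Claim_equal_check_ngram_repetition_py : Prop := ∀ (tokens : List Int) (n : Int), Dom_check_ngram_repetition_py tokens n → Pre_check_ngram_repetition_py tokens n → Spec_check_ngram_repetition_py tokens n (check_ngram_repetition_py tokens n)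

-- ===== LEMMAS AND PROOFS =====

-- the window of length N starting at position k
def pvWin (tokens : List Int) (N k : Nat) : List Int := (tokens.drop k).take N
-- exact polynomial hash, and the modular hash the folds of Source B compute
def pvPH (l : List Int) : Int := l.foldl (fun a t => a * pvB + t) 0
def pvHm (l : List Int) : Int := l.foldl (fun a t => PySem.Int.mod (a * pvB + t) pvM) 0
-- the body of Source B's scanning loop, at a Nat position
def pvStep (tokens : List Int) (N : Nat) (st : Bool × Int) (k : Nat) : Bool × Int :=
  if st.1 then st
  else if st.2 == pvHm (tokens.drop (tokens.length - N))
          && (pvWin tokens N k == tokens.drop (tokens.length - N))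
  then (true, st.2)
  else (false,
    PySem.Int.mod
      ((st.2 - tokens.getD k 0 * (pvB ^ (N - 1) % pvM)) * pvB
        + tokens.getD (k + N) 0) pvM)

theorem pvM_pos : (0:Int) < pvM := by norm_num [pvM]

theorem pv_mod (a : Int) : PySem.Int.mod a pvM = a % pvM :=
  PySem.Int.mod_eq_emod_of_pos pvM_pos

theorem pv_foldl_or (l : List Int) (p : Int → Bool) (b : Bool) :
    l.foldl (fun acc x => acc || p x) b = (b || l.any p) := by
  induction l generalizing b with
  | nil => simp
  | cons x t ih => simp [List.foldl, ih, Bool.or_assoc]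

theorem pv_any_decide (K : Nat) (P : Nat → Prop) [DecidablePred P] :
    (List.range K).any (fun k => decide (P k)) = decide (∃ j, j < K ∧ P j) := by
  rw [Bool.eq_iff_iff]; simp [List.any_eq_true]

theorem pv_any_pyRange (K : Nat) (p : Int → Bool) :
    (PySem.List.pyRange 0 (K : Int) 1).any p = (List.range K).any (fun k => p (k : Int)) := by
  rw [PySem.List.pyRange_zero_natCast, List.any_map]; rfl

theorem pv_foldl_pyRange {σ : Type} (K : Nat) (f : σ → Int → σ) (init : σ) :
    (PySem.List.pyRange 0 (K : Int) 1).foldl f init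
      = List.foldl (fun st (k : Nat) => f st (k : Int)) init (List.range K) := by
  rw [PySem.List.pyRange_zero_natCast, List.foldl_map]

theorem pv_PH_from (l : List Int) (a : Int) :
    l.foldl (fun a t => a * pvB + t) a = a * pvB ^ l.length + pvPH l := by
  induction l generalizing a with
  | nil => simp [pvPH]
  | cons x t ih =>
      simp only [List.foldl_cons, List.length_cons, pvPH]
      rw [ih (a * pvB + x), show t.foldl (fun a t => a * pvB + t) (0 * pvB + x)
            = (0 * pvB + x) * pvB ^ t.length + pvPH t from ih _]
      ring

theorem pv_PH_cons (x : Int) (l : List Int) :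
    pvPH (x :: l) = x * pvB ^ l.length + pvPH l := by
  simp only [pvPH, List.foldl_cons, zero_mul, zero_add]
  exact pv_PH_from l x

theorem pv_PH_append (l : List Int) (t : Int) : pvPH (l ++ [t]) = pvPH l * pvB + t := by
  simp [pvPH, List.foldl_append]

theorem pv_Hm_from (l : List Int) (a b : Int) (h : a = b % pvM) :
    l.foldl (fun a t => PySem.Int.mod (a * pvB + t) pvM) a
      = (l.foldl (fun a t => a * pvB + t) b) % pvM := by
  induction l generalizing a b with
  | nil => simpa using h
  | cons x t ih =>
      simp only [List.foldl_cons]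
      apply ih
      rw [pv_mod, h]
      exact Int.ModEq.add_right x (Int.ModEq.mul_right pvB (Int.emod_emod b pvM))

theorem pv_Hm_eq (l : List Int) : pvHm l = pvPH l % pvM :=
  pv_Hm_from l 0 0 (by norm_num)

theorem pv_pow_from {α : Type} (l : List α) (a b : Int) (h : a = b % pvM) :
    l.foldl (fun a _ => PySem.Int.mod (a * pvB) pvM) a = (b * pvB ^ l.length) % pvM := by
  induction l generalizing a b with
  | nil => simpa using h
  | cons x t ih =>
      simp only [List.foldl_cons, List.length_cons]
      rw [ih (PySem.Int.mod (a * pvB) pvM) (b * pvB)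
            (by rw [pv_mod, h]; exact Int.ModEq.mul_right pvB (Int.emod_emod b pvM)),
          show b * pvB * pvB ^ t.length = b * pvB ^ (t.length + 1) by ring]

theorem pv_pow (m : Nat) :
    (List.range m).foldl (fun a _ => PySem.Int.mod (a * pvB) pvM) 1 = pvB ^ m % pvM := by
  have h := pv_pow_from (List.range m) 1 1 (by norm_num [pvM])
  simpa using h

theorem pv_win_cons (tokens : List Int) (N k : Nat) (hN : 1 ≤ N) (hk : k < tokens.length) :
    pvWin tokens N k = tokens.getD k 0 :: (tokens.drop (k + 1)).take (N - 1) := by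
  obtain ⟨m, rfl⟩ : ∃ m, N = m + 1 := ⟨N - 1, by omega⟩
  unfold pvWin
  rw [List.drop_eq_getElem_cons hk, List.getD_eq_getElem _ _ hk, List.take_succ_cons]
  simp only [Nat.add_sub_cancel]

theorem pv_win_succ (tokens : List Int) (N k : Nat) (hN : 1 ≤ N)
    (hkN : k + N < tokens.length) :
    pvWin tokens N (k + 1)
      = (tokens.drop (k + 1)).take (N - 1) ++ [tokens.getD (k + N) 0] := by
  unfold pvWin
  obtain ⟨m, rfl⟩ : ∃ m, N = m + 1 := ⟨N - 1, by omega⟩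
  have hlen : m < (tokens.drop (k + 1)).length := by
    simp only [List.length_drop]; omega
  rw [List.take_succ_eq_append_getElem hlen]
  have : (tokens.drop (k + 1))[m] = tokens[k + (m + 1)]'(by omega) := by
    rw [List.getElem_drop]
    congr 1; omega
  rw [this, List.getD_eq_getElem _ _ (show k + (m + 1) < tokens.length by omega)]
  simp

theorem pv_shift (tokens : List Int) (N k : Nat) (hN : 1 ≤ N)
    (hkN : k + N < tokens.length) :
    PySem.Int.mod
        ((pvHm (pvWin tokens N k) - tokens.getD k 0 * (pvB ^ (N - 1) % pvM)) * pvB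
          + tokens.getD (k + N) 0) pvM
      = pvHm (pvWin tokens N (k + 1)) := by
  rw [pv_mod, pv_Hm_eq, pv_Hm_eq,
      pv_win_cons tokens N k hN (by omega),
      pv_win_succ tokens N k hN hkN, pv_PH_cons, pv_PH_append]
  have hmid : ((tokens.drop (k + 1)).take (N - 1)).length = N - 1 := by
    simp only [List.length_take, List.length_drop]; omega
  rw [hmid]
  set t0 := tokens.getD k 0
  set tN := tokens.getD (k + N) 0
  set m := pvPH ((tokens.drop (k + 1)).take (N - 1))
  have h1 : ((t0 * pvB ^ (N - 1) + m) % pvM - t0 * (pvB ^ (N - 1) % pvM)) * pvB + tN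
      ≡ ((t0 * pvB ^ (N - 1) + m) - t0 * pvB ^ (N - 1)) * pvB + tN [ZMOD pvM] :=
    Int.ModEq.add_right tN (Int.ModEq.mul_right pvB
      (Int.ModEq.sub (Int.emod_emod _ pvM) (Int.ModEq.mul_left t0 (Int.emod_emod _ pvM))))
  rw [h1]
  congr 1
  ring

theorem pv_foldl_fix (tokens : List Int) (N : Nat) (l : List Nat) (h : Int) :
    l.foldl (pvStep tokens N) (true, h) = (true, h) := by
  induction l with
  | nil => rfl
  | cons x t ih => simpa [pvStep] using ih

theorem pv_loop (tokens : List Int) (N : Nat) (hN : 1 ≤ N) (hNL : N ≤ tokens.length)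
    (m : Nat) : ∀ (s : Nat), s + m ≤ tokens.length - N → ∀ h : Int,
    h = pvHm (pvWin tokens N s) →
    ((List.range' s m).foldl (pvStep tokens N) (false, h)).1
      = decide (∃ j, j < m ∧ pvWin tokens N (s + j) = tokens.drop (tokens.length - N)) := by
  induction m with
  | zero => intro s _ h _; simp
  | succ m ih =>
      intro s hs h hh
      rw [List.range'_succ, List.foldl_cons]
      by_cases hw : pvWin tokens N s = tokens.drop (tokens.length - N)
      · have hstep : pvStep tokens N (false, h) s = (true, h) := by
          simp [pvStep, hw, hh]
        rw [hstep, pv_foldl_fix]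
        symm
        simp only [decide_eq_true_eq]
        exact ⟨0, by omega, by simpa using hw⟩
      · have hstep : pvStep tokens N (false, h) s
            = (false, PySem.Int.mod
                ((h - tokens.getD s 0 * (pvB ^ (N - 1) % pvM)) * pvB
                  + tokens.getD (s + N) 0) pvM) := by
          simp [pvStep, hw]
        rw [hstep, hh, pv_shift tokens N s hN (by omega),
            ih (s + 1) (by omega) _ rfl]
        rw [decide_eq_decide]
        constructor
        · rintro ⟨j, hj, hwj⟩
          exact ⟨j + 1, by omega, by rw [show s + (j + 1) = s + 1 + j by omega]; exact hwj⟩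
        · rintro ⟨j, hj, hwj⟩
          match j, hwj with
          | 0, hwj => exact absurd (by simpa using hwj) hw
          | j + 1, hwj =>
              exact ⟨j, by omega, by rw [show s + 1 + j = s + (j + 1) by omega]; exact hwj⟩

theorem pv_A_eq (tokens : List Int) (N : Nat) (hN : 1 ≤ N) (hNL : N ≤ tokens.length) :
    check_ngram_repetition_py tokens (N : Int)
      = decide (∃ j, j < tokens.length - N
          ∧ pvWin tokens N j = tokens.drop (tokens.length - N)) := by
  simp only [check_ngram_repetition_py]
  rw [if_neg (by exact_mod_cast Nat.not_lt.mpr hNL),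
      PySem.List.slice_from_neg_natCast tokens N (show 0 < N by omega),
      show ((tokens.length : Int) - (N : Int)) = ((tokens.length - N : Nat) : Int) by omega,
      pv_foldl_or, Bool.false_or, pv_any_pyRange]
  rw [PySem.List.any_congr_mem
        (g := fun k : Nat => decide (pvWin tokens N k = tokens.drop (tokens.length - N)))
        (by
          intro k hk
          rw [show ((k : Int) + (N : Int)) = ((k + N : Nat) : Int) by push_cast; ring,
              PySem.List.slice_natCast, Bool.beq_eq_decide_eq]
          simp [pvWin])]
  rw [pv_any_decide]

theorem pv_B_eq (tokens : List Int) (N : Nat) (hN : 1 ≤ N) (hNL : N ≤ tokens.length) :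
    check_ngram_repetition_py_alt tokens (N : Int)
      = decide (∃ j, j < tokens.length - N
          ∧ pvWin tokens N j = tokens.drop (tokens.length - N)) := by
  simp only [check_ngram_repetition_py_alt]
  rw [if_neg (by
    simp only [Bool.or_eq_true, decide_eq_true_eq, not_or]
    exact ⟨by omega, by exact_mod_cast Nat.not_lt.mpr hNL⟩)]
  have hHm : ∀ l : List Int,
      List.foldl (fun a t => PySem.Int.mod (a * pvB + t) pvM) 0 l = pvHm l := fun _ => rfl
  simp only [show ((tokens.length : Int) - (N : Int)) = ((tokens.length - N : Nat) : Int)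
                from by omega,
             show ((N : Int) - 1) = ((N - 1 : Nat) : Int) from by omega,
             PySem.List.slice_from_natCast, PySem.List.slice_to_natCast,
             pv_foldl_pyRange, pv_pow, hHm,
             show tokens.take N = pvWin tokens N 0 from by simp [pvWin]]
  have hwin : ∀ k : Nat, (tokens.drop k).take N = pvWin tokens N k := fun _ => rfl
  simp only [← Nat.cast_add, PySem.List.slice_natCast, Nat.add_sub_cancel_left,
             PySem.List.pyGetD_natCast, hwin]
  rw [List.range_eq_range']
  show ((List.range' 0 (tokens.length - N)).foldl (pvStep tokens N)
          (false, pvHm (pvWin tokens N 0))).1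
      = decide (∃ j, j < tokens.length - N
          ∧ pvWin tokens N j = tokens.drop (tokens.length - N))
  rw [pv_loop tokens N hN hNL (tokens.length - N) 0 (by omega) _ rfl]
  simp only [Nat.zero_add]

theorem pv_equiv (tokens : List Int) (n : Int) (hn : 0 ≤ n) :
    check_ngram_repetition_py tokens n = check_ngram_repetition_py_alt tokens n := by
  obtain ⟨N, rfl⟩ : ∃ N : Nat, n = (N : Int) := ⟨n.toNat, (Int.toNat_of_nonneg hn).symm⟩
  by_cases hL : tokens.length < N
  · rw [show check_ngram_repetition_py tokens (N : Int) = false from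
        by unfold check_ngram_repetition_py; rw [if_pos (by exact_mod_cast hL)]]
    unfold check_ngram_repetition_py_alt
    rw [if_pos (by simp; omega)]
  · have hNL : N ≤ tokens.length := by omega
    by_cases hN0 : N = 0
    · subst hN0
      cases tokens with
      | nil => decide
      | cons x t =>
          have hB : check_ngram_repetition_py_alt (x :: t) ((0 : Nat) : Int) = false := by
            simp only [check_ngram_repetition_py_alt]
            rw [if_pos (by simp)]
          have hA : check_ngram_repetition_py (x :: t) ((0 : Nat) : Int) = false := by
            simp only [check_ngram_repetition_py]
            rw [if_neg (by simp; positivity), pv_foldl_or, Bool.false_or, List.any_eq_false]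
            intro i hi
            simp only [Nat.cast_zero, sub_zero, PySem.List.mem_pyRange_one] at hi
            simp only [Nat.cast_zero, add_zero, neg_zero]
            rw [PySem.List.slice_toNat _ hi.1 hi.1]
            simp [PySem.List.slice_none_none, Bool.beq_eq_decide_eq]
          rw [hA, hB]
    · rw [pv_A_eq tokens N (by omega) hNL, pv_B_eq tokens N (by omega) hNL]

-- ===== VERDICT (by name: the statement is the Claim_ definition above) =====
theorem check_ngram_repetition_py_spec : Claim_equal_check_ngram_repetition_py := by
  intro tokens n _ hpre
  exact pv_equiv tokens n hpre
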